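-- pv_equiv track=rewrite | github.com/Alamat42/python_hello_world | 8_11827.py | f
-- ===== SOURCE A (Python) =====
-- def f(s):
--     count = 0
--     for x in s:
--         if int(x)%2==0:
--             count +=1
--     if count != 2:
--         return False
--     if (int(s[0]) % 2 == 1) and (s[1] == '7'):
--         return False
--     if (int(s[-1]) % 2 == 1) and (s[-2] == '7'):
--         return False
--     for i in range(1, len(s) - 1):
--         if int(s[i]) % 2 == 1:
--             if (s[i - 1] == '7') or (s[i + 1] == '7'):
--                 return False
--     return True
-- ===== SOURCE B (Python) =====
-- def f(s):
--     if sum(int(x) % 2 == 0 for x in s) != 2: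
--         return False
--     return not any((int(a) % 2 == 1 and b == '7') or (int(b) % 2 == 1 and a == '7')
--                    for a, b in zip(s, s[1:]))
-- ===== Notes on version B (the rewrite author's own statement) =====
-- stated objective: simpler
-- what changed: Replaces A's three separate checks (first char, last char, and an index loop over the middle with look-behind and look-ahead) by a single uniform scan over adjacent character pairs with a symmetric odd/seven-adjacency predicate, and the counting loop by a sum of a generator.
import Mathlib
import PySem

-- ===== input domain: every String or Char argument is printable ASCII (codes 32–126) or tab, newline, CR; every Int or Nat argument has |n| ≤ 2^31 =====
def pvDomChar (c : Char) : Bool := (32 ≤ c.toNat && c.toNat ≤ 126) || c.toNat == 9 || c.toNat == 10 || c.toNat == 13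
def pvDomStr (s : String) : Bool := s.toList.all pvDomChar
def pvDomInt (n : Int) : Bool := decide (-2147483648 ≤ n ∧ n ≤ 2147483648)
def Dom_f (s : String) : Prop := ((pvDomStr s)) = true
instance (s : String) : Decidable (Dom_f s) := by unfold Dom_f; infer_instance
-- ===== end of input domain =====

-- B replaces A's three separate boundary/middle checks by one uniform scan over adjacent pairs (objective: simpler).

-- ===== PORT A =====
-- int(x) for a single character x (exact: none = ValueError, handled by Pre_f)
def pvDV (c : Char) : Int := (PySem.Int.ofChars? [c]).getD 0

-- the 'for i in range(1, len(s)-1)' loop with its early return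
def pvALoop (cs : List Char) : List Int → Bool
  | [] => true
  | i :: rest =>
    if PySem.Int.mod (pvDV (PySem.List.pyGetD cs i ' ')) 2 == 1 then
      if (PySem.List.pyGetD cs (i - 1) ' ' == '7') || (PySem.List.pyGetD cs (i + 1) ' ' == '7') then
        false
      else pvALoop cs rest
    else pvALoop cs rest

def f (s : String) : Bool :=
  if s.toList.foldl (fun c x => if PySem.Int.mod (pvDV x) 2 = 0 then c + 1 else c) (0 : Int) ≠ 2 then false
  else if (PySem.Int.mod (pvDV (PySem.List.pyGetD s.toList 0 ' ')) 2 == 1) && (PySem.List.pyGetD s.toList 1 ' ' == '7') then false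
  else if (PySem.Int.mod (pvDV (PySem.List.pyGetD s.toList (-1) ' ')) 2 == 1) && (PySem.List.pyGetD s.toList (-2) ' ' == '7') then false
  else pvALoop s.toList (PySem.List.pyRange 1 ((s.toList.length : Int) - 1) 1)

-- ===== PORT B =====
def pvBad (a b : Char) : Bool :=
  ((PySem.Int.mod (pvDV a) 2 == 1) && (b == '7')) || ((PySem.Int.mod (pvDV b) 2 == 1) && (a == '7'))

def f_alt (s : String) : Bool :=
  if s.toList.countP (fun x => PySem.Int.mod (pvDV x) 2 == 0) ≠ 2 then false
  else !((s.toList.zip s.toList.tail).any (fun p => pvBad p.1 p.2))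

-- ===== PRECONDITION & SPEC =====
-- Pre_f excludes strings with a non-digit character, on which A's int(x) raises ValueError.
def Pre_f (s : String) : Prop := s.toList.all (fun c => ('0' ≤ c) && (c ≤ '9')) = true
instance (s : String) : Decidable (Pre_f s) := by unfold Pre_f; infer_instance
def pvWitness_f : String := "2747"

def Spec_f (s : String) (out : Bool) : Prop := out = f_alt s
instance (s : String) (out : Bool) : Decidable (Spec_f s out) := by unfold Spec_f; infer_instance

-- ===== CLAIM (what is proved, stated in full; the proofs are below) =====
def Claim_equal_f : Prop := ∀ (s : String), Dom_f s → Pre_f s → Spec_f s (f s)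

-- ===== LEMMAS AND PROOFS =====

-- the middle-loop test of A at index i, as a predicate
def pvMid (cs : List Char) (i : Int) : Bool :=
  (PySem.Int.mod (pvDV (PySem.List.pyGetD cs i ' ')) 2 == 1) &&
    ((PySem.List.pyGetD cs (i - 1) ' ' == '7') || (PySem.List.pyGetD cs (i + 1) ' ' == '7'))

theorem pvALoop_eq_any (cs : List Char) (r : List Int) :
    pvALoop cs r = !(r.any (pvMid cs)) := by
  induction r with
  | nil => simp [pvALoop]
  | cons i rest ih =>
    have key : ∀ (c1 c2 y : Bool), (if c1 then (if c2 then false else y) else y) = (!(c1 && c2) && y) := by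
      decide
    simp only [pvALoop, List.any_cons, ih]
    rw [key]
    simp [pvMid]

theorem pvZipAny_iff (cs : List Char) :
    ((cs.zip cs.tail).any (fun p => pvBad p.1 p.2) = true) ↔
      ∃ (j : Nat) (h : j + 1 < cs.length), pvBad (cs[j]'(by omega)) (cs[j+1]'h) = true := by
  rw [List.any_eq_true]
  constructor
  · rintro ⟨p, hp, hbad⟩
    obtain ⟨j, hj, hget⟩ := List.mem_iff_getElem.1 hp
    have hj' : j + 1 < cs.length := by
      simp [List.length_zip, List.length_tail] at hj; omega
    refine ⟨j, hj', ?_⟩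
    have : (cs.zip cs.tail)[j] = (cs[j]'(by omega), cs.tail[j]'(by simp [List.length_tail]; omega)) :=
      List.getElem_zip
    rw [this] at hget
    have ht : cs.tail[j]'(by simp [List.length_tail]; omega) = cs[j+1]'hj' := List.getElem_tail _
    rw [ht] at hget
    rw [← hget] at hbad; simpa using hbad
  · rintro ⟨j, hj, hbad⟩
    refine ⟨(cs[j]'(by omega), cs[j+1]'hj), ?_, hbad⟩
    apply List.mem_iff_getElem.2
    refine ⟨j, by simp [List.length_zip, List.length_tail]; omega, ?_⟩
    rw [List.getElem_zip]
    congr 1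
    exact List.getElem_tail _

theorem pvGD (cs : List Char) (i : Int) (k : Nat) (hik : i = (k : Int)) (hk : k < cs.length) :
    PySem.List.pyGetD cs i ' ' = cs[k] := by
  subst hik
  rw [PySem.List.pyGetD_natCast]
  exact List.getD_eq_getElem cs ' ' hk

theorem pvBad_iff (a b : Char) :
    pvBad a b = true ↔
      (PySem.Int.mod (pvDV a) 2 = 1 ∧ b = '7') ∨ (PySem.Int.mod (pvDV b) 2 = 1 ∧ a = '7') := by
  simp [pvBad]

theorem pvMain (cs : List Char) (h2 : 2 ≤ cs.length) :
    (if (PySem.Int.mod (pvDV (PySem.List.pyGetD cs 0 ' ')) 2 == 1) && (PySem.List.pyGetD cs 1 ' ' == '7') then false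
     else if (PySem.Int.mod (pvDV (PySem.List.pyGetD cs (-1) ' ')) 2 == 1) && (PySem.List.pyGetD cs (-2) ' ' == '7') then false
     else pvALoop cs (PySem.List.pyRange 1 ((cs.length : Int) - 1) 1))
    = !((cs.zip cs.tail).any (fun p => pvBad p.1 p.2)) := by
  rw [pvALoop_eq_any]
  have key : ∀ (a b y : Bool), (if a then false else if b then false else !y) = !(a || (b || y)) := by
    decide
  rw [key]
  congr 1
  rw [Bool.eq_iff_iff]
  rw [pvZipAny_iff]
  have hg0 : PySem.List.pyGetD cs 0 ' ' = cs[0]'(by omega) := pvGD cs 0 0 (by omega) (by omega)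
  have hg1 : PySem.List.pyGetD cs 1 ' ' = cs[1]'(by omega) := pvGD cs 1 1 (by omega) (by omega)
  have hgm1 : PySem.List.pyGetD cs (-1) ' ' = cs[cs.length - 1]'(by omega) := by
    rw [PySem.List.pyGetD_neg_ofNat cs 1 ' ' (by omega) (by omega)]
  have hgm2 : PySem.List.pyGetD cs (-2) ' ' = cs[cs.length - 2]'(by omega) := by
    rw [PySem.List.pyGetD_neg_ofNat cs 2 ' ' (by omega) (by omega)]
  simp only [Bool.or_eq_true, Bool.and_eq_true, beq_iff_eq, List.any_eq_true,
    PySem.List.mem_pyRange_one, pvMid, hg0, hg1, hgm1, hgm2]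
  constructor
  · rintro (⟨hodd, h7⟩ | ⟨hodd, h7⟩ | ⟨i, ⟨hi1, hi2⟩, hodd, hmid⟩)
    · exact ⟨0, by omega, (pvBad_iff _ _).2 (Or.inl ⟨hodd, h7⟩)⟩
    · refine ⟨cs.length - 2, by omega, (pvBad_iff _ _).2 (Or.inr ⟨?_, h7⟩)⟩
      have he : cs.length - 2 + 1 = cs.length - 1 := by omega
      simp only [he]
      exact hodd
    · -- middle index i, 1 ≤ i < cs.length - 1
      have hik : i = ((i.toNat : Nat) : Int) := by omega
      have hkl : i.toNat < cs.length := by omega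
      have hgi : PySem.List.pyGetD cs i ' ' = cs[i.toNat]'hkl := pvGD cs i i.toNat hik hkl
      rcases hmid with h7l | h7r
      · -- left neighbour is '7': pair (i-1, i)
        have hgm : PySem.List.pyGetD cs (i - 1) ' ' = cs[i.toNat - 1]'(by omega) :=
          pvGD cs (i - 1) (i.toNat - 1) (by omega) (by omega)
        refine ⟨i.toNat - 1, by omega, (pvBad_iff _ _).2 (Or.inr ⟨?_, ?_⟩)⟩
        · have he : i.toNat - 1 + 1 = i.toNat := by omega
          simp only [he]
          rw [hgi] at hodd; exact hodd
        · rw [hgm] at h7l; exact h7l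
      · -- right neighbour is '7': pair (i, i+1)
        have hgp : PySem.List.pyGetD cs (i + 1) ' ' = cs[i.toNat + 1]'(by omega) :=
          pvGD cs (i + 1) (i.toNat + 1) (by omega) (by omega)
        refine ⟨i.toNat, by omega, (pvBad_iff _ _).2 (Or.inl ⟨?_, ?_⟩)⟩
        · rw [hgi] at hodd; exact hodd
        · rw [hgp] at h7r; exact h7r
  · rintro ⟨j, hj, hbad⟩
    rcases (pvBad_iff _ _).1 hbad with ⟨hodd, h7⟩ | ⟨hodd, h7⟩
    · by_cases hj0 : j = 0
      · subst hj0; exact Or.inl ⟨hodd, h7⟩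
      · refine Or.inr (Or.inr ⟨(j : Int), ⟨by omega, by omega⟩, ?_, Or.inr ?_⟩)
        · rw [pvGD cs (j : Int) j rfl (by omega)]; exact hodd
        · rw [pvGD cs ((j : Int) + 1) (j + 1) (by omega) (by omega)]; exact h7
    · by_cases hjl : j + 1 = cs.length - 1
      · refine Or.inr (Or.inl ⟨?_, ?_⟩)
        · have he : cs.length - 1 = j + 1 := by omega
          simp only [he]
          exact hodd
        · have he : cs.length - 2 = j := by omega
          simp only [he]
          exact h7
      · refine Or.inr (Or.inr ⟨(j : Int) + 1, ⟨by omega, by omega⟩, ?_, Or.inl ?_⟩)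
        · rw [pvGD cs ((j : Int) + 1) (j + 1) (by omega) (by omega)]; exact hodd
        · rw [pvGD cs ((j : Int) + 1 - 1) j (by omega) (by omega)]; exact h7

theorem pvCount_eq (cs : List Char) :
    cs.foldl (fun c x => if PySem.Int.mod (pvDV x) 2 = 0 then c + 1 else c) (0 : Int)
      = ((cs.countP (fun x => PySem.Int.mod (pvDV x) 2 == 0) : Nat) : Int) := by
  rw [PySem.List.foldl_ite_add_one]
  have hp : (fun x => decide (PySem.Int.mod (pvDV x) 2 = 0)) = (fun x => PySem.Int.mod (pvDV x) 2 == 0) := by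
    funext x; rw [beq_eq_decide]
  rw [zero_add, hp]

-- ===== VERDICT (by name: the statement is the Claim_ definition above) =====
theorem f_spec : Claim_equal_f := by
  intro s _ _
  unfold Spec_f f f_alt
  rw [pvCount_eq]
  by_cases hc : (s.toList.countP (fun x => PySem.Int.mod (pvDV x) 2 == 0)) = 2
  · have hlen : 2 ≤ s.toList.length := by
      have := List.countP_le_length (p := fun x => PySem.Int.mod (pvDV x) 2 == 0) (l := s.toList)
      omega
    have hA : ¬(((s.toList.countP (fun x => PySem.Int.mod (pvDV x) 2 == 0) : Nat) : Int) ≠ 2) := by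
      omega
    rw [if_neg hA, if_neg (by omega : ¬(s.toList.countP (fun x => PySem.Int.mod (pvDV x) 2 == 0) ≠ 2))]
    exact pvMain s.toList hlen
  · have hA : ((s.toList.countP (fun x => PySem.Int.mod (pvDV x) 2 == 0) : Nat) : Int) ≠ 2 := by
      omega
    rw [if_pos hA, if_pos hc]
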